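-- pv_equiv track=rewrite | github.com/stremme1/Emmett-Stralka-Portfolio | Practice_Python/hw9pr1lifef22/hw9pr1.py | innerCells
-- ===== SOURCE A (Python) =====
-- def createOneRow(width):
--     """Returns one row of zeros of width "width"...
--        You might use this in your createBoard(width, height) function."""
--     row = []
--     for col in range(width):
--         row += [0]
--     return row
--
-- def createBoard(width, height):
--     """Returns a 2D array with "height" rows and "width" columns."""
--     A = []
--     for row in range(height):
--         A += [createOneRow(width)]  # Use the above function so that SOMETHING is one row!
--     return A
--
-- def innerCells(width, height):
--     """Creates an empty board and then modifies it
--        so that it has a inner center of "on" cells.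
--        But it does that only in the *interior* of the 2D array.
--     """
--     A = createBoard(width, height)
--
--     for row in range(1, height - 1):
--         for col in range(1, width - 1):
--             if row < col or col<row or row==col:
--                 A[row][col] = 1
--             else:
--                 A[row][col] = 0
--
--     return A
-- ===== SOURCE B (Python) =====
-- def innerCells(width, height):
--     """Board with interior cells on, built by row replication: compute one
--     border-row template and one interior-row template, then assemble the board
--     as border + copies of the interior row + border (no per-cell loop)."""
--     if height <= 0:
--         return []
--     border = [0] * width
--     if height == 1:
--         return [border]
--     if width >= 2:
--         interior = [0] + [1] * (width - 2) + [0]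
--     else:
--         interior = [0] * width
--     return [border] + [interior[:] for _ in range(height - 2)] + [border[:]]
-- ===== Notes on version B (the rewrite author's own statement) =====
-- stated objective: simpler
-- what changed: Replaced A's per-cell structure (build a zero board row by row, then mutate every interior cell in a second nested index loop with a dead else-branch) by row replication: compute one border-row template and one interior-row template once, then assemble the board by concatenation (copying the templates), avoiding the per-cell Python loop.
import Mathlib
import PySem

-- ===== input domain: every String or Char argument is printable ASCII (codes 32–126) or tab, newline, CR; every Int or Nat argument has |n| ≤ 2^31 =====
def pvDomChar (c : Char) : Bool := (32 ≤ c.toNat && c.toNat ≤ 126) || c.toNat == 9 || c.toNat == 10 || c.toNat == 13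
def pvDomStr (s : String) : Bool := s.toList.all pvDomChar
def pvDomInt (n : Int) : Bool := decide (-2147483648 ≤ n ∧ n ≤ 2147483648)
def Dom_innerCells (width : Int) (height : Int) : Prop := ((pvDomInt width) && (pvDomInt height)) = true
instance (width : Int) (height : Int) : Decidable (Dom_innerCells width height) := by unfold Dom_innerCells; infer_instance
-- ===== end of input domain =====

-- B replaces A's build-zero-board-then-mutate-every-interior-cell structure by row
-- replication: two row templates computed once, board assembled by concatenation
-- (objective: simpler). A mutates only its local board, so return-value
-- equivalence is full equivalence.

-- ===== PORT A =====
def createOneRow (width : Int) : List Int :=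
  (PySem.List.pyRange 0 width 1).foldl (fun row _ => row ++ [0]) []

def createBoard (width : Int) (height : Int) : List (List Int) :=
  (PySem.List.pyRange 0 height 1).foldl (fun A _ => A ++ [createOneRow width]) []

-- A[row][col] = v is ported as pySetD/pyGetD at row and col; exact here since every
-- loop index row ∈ range(1, height-1), col ∈ range(1, width-1) is in range for the board.
def innerCells (width : Int) (height : Int) : List (List Int) :=
  (PySem.List.pyRange 1 (height - 1) 1).foldl (fun A row =>
    (PySem.List.pyRange 1 (width - 1) 1).foldl (fun A col =>
      if row < col ∨ col < row ∨ row = col then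
        PySem.List.pySetD A row (PySem.List.pySetD (PySem.List.pyGetD A row []) col 1)
      else
        PySem.List.pySetD A row (PySem.List.pySetD (PySem.List.pyGetD A row []) col 0)) A)
    (createBoard width height)

-- ===== PORT B =====
-- [0]*width → List.replicate width.toNat 0 (empty for width ≤ 0, as in Python);
-- interior[:] copies a list, which is the identity on the value.
def innerCells_alt (width : Int) (height : Int) : List (List Int) :=
  if height ≤ 0 then []
  else
    let border : List Int := List.replicate width.toNat 0
    if height = 1 then [border]
    else
      let interior : List Int :=
        if 2 ≤ width then [0] ++ List.replicate (width - 2).toNat 1 ++ [0]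
        else List.replicate width.toNat 0
      [border] ++ List.replicate (height - 2).toNat interior ++ [border]

-- ===== PRECONDITION & SPEC =====
def Spec_innerCells (width : Int) (height : Int) (out : List (List Int)) : Prop := out = innerCells_alt width height
instance (width : Int) (height : Int) (out : List (List Int)) : Decidable (Spec_innerCells width height out) := by unfold Spec_innerCells; infer_instance

-- ===== CLAIM (what is proved, stated in full; the proofs are below) =====
def Claim_equal_innerCells : Prop := ∀ (width : Int) (height : Int), Dom_innerCells width height → Spec_innerCells width height (innerCells width height)

-- ===== LEMMAS AND PROOFS =====

theorem createOneRow_eq (w : Int) :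
    createOneRow w = (PySem.List.pyRange 0 w 1).map (fun _ => (0 : Int)) := by
  simp [createOneRow]

theorem createBoard_eq (w h : Int) :
    createBoard w h = (PySem.List.pyRange 0 h 1).map (fun _ => createOneRow w) := by
  simp [createBoard]

-- the inner column loop, acting on one row: every visited cell becomes 1
theorem rowFold_getElem? (C : List Int) (row : List Int) (hC : ∀ c ∈ C, 0 ≤ c) (i : Nat) :
    (C.foldl (fun row c => PySem.List.pySetD row c (1 : Int)) row)[i]? =
      if (i : Int) ∈ C ∧ i < row.length then some 1 else row[i]? := by
  induction C generalizing row with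
  | nil => simp
  | cons c C ih =>
    have hc : 0 ≤ c := hC c (by simp)
    have hcast : c = ((c.toNat : Nat) : Int) := (Int.toNat_of_nonneg hc).symm
    rw [List.foldl_cons, ih _ (fun x hx => hC x (by simp [hx]))]
    rw [hcast, PySem.List.pySetD_natCast]
    simp only [List.length_set, List.getElem?_set, List.mem_cons]
    by_cases hmem : (i : Int) ∈ C
    · by_cases hlen : i < row.length
      · simp [hmem, hlen]
      · simp [hmem, hlen]
        omega
    · by_cases hic : c.toNat = i
      · have hie : (i : Int) = ((c.toNat : Nat) : Int) := by omega
        by_cases hlen : i < row.length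
        · simp [hic, hlen, hie]
        · simp [hic, hlen, hie]
      · simp [hmem, hic]
        intro h1
        exact absurd h1 (by omega)

-- the inner column loop acting through the board at a fixed in-range row index
theorem rowLocal (C : List Int) (A : List (List Int)) (r : Int) (h0 : 0 ≤ r)
    (hr : r.toNat < A.length) :
    C.foldl (fun A c => PySem.List.pySetD A r (PySem.List.pySetD (PySem.List.pyGetD A r []) c 1)) A
      = PySem.List.pySetD A r
          (C.foldl (fun row c => PySem.List.pySetD row c (1 : Int)) (PySem.List.pyGetD A r [])) := by
  have hcast : r = ((r.toNat : Nat) : Int) := (Int.toNat_of_nonneg h0).symm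
  induction C generalizing A with
  | nil =>
    simp only [List.foldl_nil]
    rw [hcast, PySem.List.pySetD_natCast, PySem.List.pyGetD_natCast,
      List.getD_eq_getElem?_getD, List.getElem?_eq_getElem hr]
    exact (List.set_getElem_self hr).symm
  | cons c C ih =>
    simp only [List.foldl_cons]
    rw [ih (PySem.List.pySetD A r (PySem.List.pySetD (PySem.List.pyGetD A r []) c 1))
      (by rw [PySem.List.length_pySetD]; exact hr)]
    rw [hcast]
    simp only [PySem.List.pySetD_natCast, PySem.List.pyGetD_natCast]
    have h1 : (A.set r.toNat (PySem.List.pySetD (A.getD r.toNat []) c 1)).getD r.toNat []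
        = PySem.List.pySetD (A.getD r.toNat []) c 1 := by
      rw [List.getD_eq_getElem?_getD, List.getElem?_set_self (by simpa using hr)]
      rfl
    rw [h1, List.set_set]

-- the outer row loop: each visited (in-range, strictly increasing) row index gets
-- the inner loop's image of its old row; other rows are untouched
theorem outerFold_getElem? (C : List Int) (R : List Int) (B : List (List Int))
    (hR : ∀ r ∈ R, 0 ≤ r ∧ r < (B.length : Int)) (hnd : R.Pairwise (· < ·)) (i : Nat) :
    (R.foldl (fun A r =>
        C.foldl (fun A c => PySem.List.pySetD A r (PySem.List.pySetD (PySem.List.pyGetD A r []) c 1)) A) B)[i]? =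
      if (i : Int) ∈ R then
        some (C.foldl (fun row c => PySem.List.pySetD row c (1 : Int)) (B.getD i []))
      else B[i]? := by
  induction R generalizing B with
  | nil => simp
  | cons r R ih =>
    obtain ⟨hr0, hrlen⟩ := hR r (by simp)
    have hrn : r.toNat < B.length := by omega
    have hcast : r = ((r.toNat : Nat) : Int) := (Int.toNat_of_nonneg hr0).symm
    simp only [List.foldl_cons]
    rw [rowLocal C B r hr0 hrn]
    have hgt : ∀ r' ∈ R, r < r' := fun r' h => (List.pairwise_cons.mp hnd).1 r' h
    have hB'nat : PySem.List.pySetD B r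
        (C.foldl (fun row c => PySem.List.pySetD row c (1 : Int)) (PySem.List.pyGetD B r []))
        = B.set r.toNat (C.foldl (fun row c => PySem.List.pySetD row c (1 : Int)) (B.getD r.toNat [])) := by
      conv_lhs => rw [hcast]
      rw [PySem.List.pySetD_natCast, PySem.List.pyGetD_natCast]
    rw [hB'nat]
    have hR' : ∀ r' ∈ R, 0 ≤ r' ∧ r' <
        ((B.set r.toNat (C.foldl (fun row c => PySem.List.pySetD row c (1 : Int)) (B.getD r.toNat []))).length : Int) := by
      intro r' h
      have := hR r' (by simp [h])
      simpa using this
    rw [ih _ hR' (List.pairwise_cons.mp hnd).2]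
    by_cases hmem : (i : Int) ∈ R
    · have hlt : r < (i : Int) := hgt _ hmem
      have hne : r.toNat ≠ i := by omega
      have hmemc : (i : Int) ∈ r :: R := by simp [hmem]
      rw [if_pos hmem, if_pos hmemc, List.getD_eq_getElem?_getD, List.getD_eq_getElem?_getD,
        List.getElem?_set_ne hne, List.getD_eq_getElem?_getD]
    · by_cases hir : (i : Int) = r
      · have hieq : i = r.toNat := by omega
        have hmemc : (i : Int) ∈ r :: R := by simp [hir]
        rw [if_neg hmem, if_pos hmemc, hieq, List.getElem?_set_self hrn]
      · have hne : r.toNat ≠ i := by omega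
        have hmemc : ¬ (i : Int) ∈ r :: R := by simp [hmem, hir]
        rw [if_neg hmem, if_neg hmemc, List.getElem?_set_ne hne]

-- one interior row of A equals the per-cell formula for an interior row index
theorem interiorRow_eq (w hgt r : Int) (hr : 0 < r ∧ r < hgt - 1) :
    (PySem.List.pyRange 1 (w - 1) 1).foldl (fun row c => PySem.List.pySetD row c (1 : Int)) (createOneRow w)
      = (PySem.List.pyRange 0 w 1).map (fun c => if 0 < r ∧ r < hgt - 1 ∧ 0 < c ∧ c < w - 1 then 1 else 0) := by
  apply List.ext_getElem?
  intro j
  rw [rowFold_getElem? _ _ (by intro c hc; rw [PySem.List.mem_pyRange_one] at hc; omega)]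
  rw [createOneRow_eq]
  simp only [List.getElem?_map, PySem.List.getElem?_pyRange_one, PySem.List.length_pyRange_one,
    List.length_map]
  by_cases hj : j < (w - 0).toNat
  · by_cases hmem : (j : Int) ∈ PySem.List.pyRange 1 (w - 1) 1
    · have hmem' := (PySem.List.mem_pyRange_one).mp hmem
      rw [if_pos ⟨hmem, hj⟩, if_pos hj]
      simp only [Option.map_some, Option.some.injEq]
      rw [if_pos ⟨hr.1, hr.2, by omega, by omega⟩]
    · have hmem' : ¬ (1 ≤ (j : Int) ∧ (j : Int) < w - 1) := by
        rw [← PySem.List.mem_pyRange_one]; exact hmem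
      rw [if_neg (fun hcon => hmem hcon.1), if_pos hj]
      simp only [Option.map_some, Option.some.injEq]
      rw [if_neg (by omega)]
  · rw [if_neg (fun hcon => hj hcon.2), if_neg hj]
    rfl

-- A equals the per-cell map form
theorem innerCells_eq_map (w h : Int) :
    innerCells w h =
      (PySem.List.pyRange 0 h 1).map (fun r =>
        (PySem.List.pyRange 0 w 1).map (fun c =>
          if 0 < r ∧ r < h - 1 ∧ 0 < c ∧ c < w - 1 then 1 else 0)) := by
  unfold innerCells
  have hcollapse : ∀ (A : List (List Int)) (row : Int),
      ((PySem.List.pyRange 1 (w - 1) 1).foldl (fun A col =>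
        if row < col ∨ col < row ∨ row = col then
          PySem.List.pySetD A row (PySem.List.pySetD (PySem.List.pyGetD A row []) col 1)
        else
          PySem.List.pySetD A row (PySem.List.pySetD (PySem.List.pyGetD A row []) col 0)) A)
      = (PySem.List.pyRange 1 (w - 1) 1).foldl (fun A col =>
          PySem.List.pySetD A row (PySem.List.pySetD (PySem.List.pyGetD A row []) col 1)) A := by
    intro A row
    apply PySem.List.foldl_congr_mem
    intro acc col _
    rw [if_pos]
    rcases lt_trichotomy row col with hc | hc | hc
    · exact Or.inl hc
    · exact Or.inr (Or.inr hc)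
    · exact Or.inr (Or.inl hc)
  simp only [hcollapse]
  have hBlen : (createBoard w h).length = (h - 0).toNat := by
    rw [createBoard_eq]; simp [PySem.List.length_pyRange_one]
  apply List.ext_getElem?
  intro i
  rw [outerFold_getElem? _ _ _
    (by
      intro r hrm
      rw [PySem.List.mem_pyRange_one] at hrm
      refine ⟨by omega, ?_⟩
      rw [hBlen]; omega)
    (PySem.List.pairwise_lt_pyRange_one _ _)]
  rw [List.getElem?_map, PySem.List.getElem?_pyRange_one]
  by_cases hmem : (i : Int) ∈ PySem.List.pyRange 1 (h - 1) 1
  · have hmem' := (PySem.List.mem_pyRange_one).mp hmem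
    have hih : i < (h - 0).toNat := by omega
    have hgd : (createBoard w h).getD i [] = createOneRow w := by
      rw [createBoard_eq, List.getD_eq_getElem?_getD, List.getElem?_map,
        PySem.List.getElem?_pyRange_one]
      rw [if_pos (by omega)]
      rfl
    rw [if_pos hmem, hgd, interiorRow_eq w h ((0 : Int) + (i : Int)) (by omega), if_pos hih]
    simp
  · have hmem' : ¬ (1 ≤ (i : Int) ∧ (i : Int) < h - 1) := by
      rw [← PySem.List.mem_pyRange_one]; exact hmem
    rw [if_neg hmem, createBoard_eq, List.getElem?_map, PySem.List.getElem?_pyRange_one]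
    by_cases hih : i < (h - 0).toNat
    · rw [if_pos hih]
      simp only [Option.map_some, Option.some.injEq]
      rw [createOneRow_eq]
      apply List.map_congr_left
      intro c _
      rw [if_neg (by omega)]
    · rw [if_neg hih]
      rfl

-- a non-interior (border) row of the map form is the all-zero row template
theorem mapRow_border (w h r : Int) (hr : ¬ (0 < r ∧ r < h - 1)) :
    (PySem.List.pyRange 0 w 1).map (fun c =>
        if 0 < r ∧ r < h - 1 ∧ 0 < c ∧ c < w - 1 then (1 : Int) else 0)
      = List.replicate w.toNat 0 := by
  rw [List.eq_replicate_iff]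
  constructor
  · simp [PySem.List.length_pyRange_one]
  · intro x hx
    obtain ⟨c, hc, hce⟩ := List.mem_map.mp hx
    rw [← hce, if_neg (by tauto)]

-- an interior row of the map form is B's interior row template
theorem mapRow_interior (w h r : Int) (hr : 0 < r ∧ r < h - 1) :
    (PySem.List.pyRange 0 w 1).map (fun c =>
        if 0 < r ∧ r < h - 1 ∧ 0 < c ∧ c < w - 1 then (1 : Int) else 0)
      = if 2 ≤ w then [0] ++ List.replicate (w - 2).toNat 1 ++ [0]
        else List.replicate w.toNat 0 := by
  by_cases hw : 2 ≤ w
  · rw [if_pos hw]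
    apply List.ext_getElem?
    intro j
    rw [List.getElem?_map, PySem.List.getElem?_pyRange_one]
    have hlen2 : (List.replicate (w - 2).toNat (1 : Int)).length = (w - 2).toNat := by simp
    by_cases hj : j < (w - 0).toNat
    · rw [if_pos hj]
      simp only [Option.map_some, zero_add]
      match j with
      | 0 =>
        simp only [List.cons_append, List.nil_append, List.getElem?_cons_zero, Option.some.injEq,
          Nat.cast_zero]
        rw [if_neg (by omega)]
      | Nat.succ k =>
        simp only [List.cons_append, List.nil_append, List.getElem?_cons_succ]
        by_cases hk : k < (w - 2).toNat
        · rw [List.getElem?_append_left (by simpa using hk), List.getElem?_replicate, if_pos hk]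
          simp only [Option.some.injEq]
          rw [if_pos ⟨hr.1, hr.2, by omega, by omega⟩]
        · have hkeq : k = (w - 2).toNat := by omega
          rw [List.getElem?_append_right (by simp [hkeq]), hlen2]
          simp only [hkeq, Nat.sub_self, List.getElem?_cons_zero, Option.some.injEq]
          rw [if_neg (by omega)]
    · rw [if_neg hj, List.getElem?_eq_none (by simp; omega)]
      rfl
  · rw [if_neg hw, List.eq_replicate_iff]
    refine ⟨by simp [PySem.List.length_pyRange_one], ?_⟩
    intro x hx
    obtain ⟨c, hc, hce⟩ := List.mem_map.mp hx
    rw [PySem.List.mem_pyRange_one] at hc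
    rw [← hce, if_neg (by omega)]

-- B equals the per-cell map form
theorem alt_eq_map (w h : Int) :
    innerCells_alt w h =
      (PySem.List.pyRange 0 h 1).map (fun r =>
        (PySem.List.pyRange 0 w 1).map (fun c =>
          if 0 < r ∧ r < h - 1 ∧ 0 < c ∧ c < w - 1 then 1 else 0)) := by
  unfold innerCells_alt
  by_cases h0 : h ≤ 0
  · rw [if_pos h0]
    symm
    rw [List.map_eq_nil_iff, ← List.length_eq_zero_iff, PySem.List.length_pyRange_one]
    omega
  · rw [if_neg h0]
    by_cases h1 : h = 1
    · rw [if_pos h1, h1]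
      have : PySem.List.pyRange 0 1 1 = [(0 : Int)] := by decide
      rw [this, List.map_cons, List.map_nil, mapRow_border w 1 0 (by omega)]
    · rw [if_neg h1]
      apply List.ext_getElem?
      intro i
      rw [List.getElem?_map, PySem.List.getElem?_pyRange_one]
      have hlenL : ((List.replicate (w.toNat) (0 : Int) :: (List.replicate (h - 2).toNat
          (if 2 ≤ w then [0] ++ List.replicate (w - 2).toNat 1 ++ [0] else List.replicate w.toNat 0)
          ++ [List.replicate w.toNat 0]))).length = (h - 0).toNat := by
        simp; omega
      by_cases hi : i < (h - 0).toNat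
      · rw [if_pos hi]
        simp only [Option.map_some, zero_add]
        match i with
        | 0 =>
          simp only [List.cons_append, List.nil_append, List.getElem?_cons_zero, Option.some.injEq,
            Nat.cast_zero]
          rw [mapRow_border w h 0 (by omega)]
        | Nat.succ k =>
          simp only [List.cons_append, List.nil_append, List.getElem?_cons_succ]
          by_cases hk : k < (h - 2).toNat
          · rw [List.getElem?_append_left (by simpa using hk), List.getElem?_replicate, if_pos hk]
            simp only [Option.some.injEq]
            rw [mapRow_interior w h _ ⟨by omega, by omega⟩]
            rfl
          · have hkeq : k = (h - 2).toNat := by omega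
            rw [List.getElem?_append_right (by simp [hkeq])]
            simp only [List.length_replicate, hkeq, Nat.sub_self, List.getElem?_cons_zero,
              Option.some.injEq]
            rw [mapRow_border w h _ (by omega)]
      · rw [if_neg hi, List.getElem?_eq_none (by simp; omega)]
        rfl

-- ===== VERDICT (by name: the statement is the Claim_ definition above) =====
theorem innerCells_spec : Claim_equal_innerCells := by
  intro w h _
  unfold Spec_innerCells
  rw [innerCells_eq_map, alt_eq_map]
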